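-- pv_equiv track=rewrite | github.com/ClaraGhabro/metaheuristique | src/meta.py | find_ord_neigh
-- ===== SOURCE A (Python) =====
-- composant = [[1, 3, 5, 7, 9],
--              [2, 4, 6, 8, 10],
--              [11, 13, 15, 17, 19],
--              [12, 14, 16, 18, 20],
--              [21, 22, 23, 24, 25]]
--
-- def find_ord_neigh(neigh):
--     list_ord = []
--     for elt in neigh:
--         for i in range(5):
--             for j in range(5):
--                 if elt == composant[i][j]:
--                     list_ord.append(j)
--     return list_ord
-- ===== SOURCE B (Python) =====
-- def find_ord_neigh(neigh):
--     # Closed-form: the 5x5 grid is exactly the values 1..25, and each value's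
--     # column is an arithmetic function of the value itself -- no grid scan, no table.
--     list_ord = []
--     for elt in neigh:
--         if 1 <= elt <= 10:
--             list_ord.append((elt - 1) // 2)
--         elif 11 <= elt <= 20:
--             list_ord.append((elt - 11) // 2)
--         elif 21 <= elt <= 25:
--             list_ord.append(elt - 21)
--     return list_ord
-- ===== Notes on version B (the rewrite author's own statement) =====
-- stated objective: faster
-- what changed: Replaces the per-element nested 5x5 grid scan with a closed-form arithmetic formula for the column ((v-1)//2, (v-11)//2 or v-21 by range), eliminating the grid data structure entirely.
import Mathlib
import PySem

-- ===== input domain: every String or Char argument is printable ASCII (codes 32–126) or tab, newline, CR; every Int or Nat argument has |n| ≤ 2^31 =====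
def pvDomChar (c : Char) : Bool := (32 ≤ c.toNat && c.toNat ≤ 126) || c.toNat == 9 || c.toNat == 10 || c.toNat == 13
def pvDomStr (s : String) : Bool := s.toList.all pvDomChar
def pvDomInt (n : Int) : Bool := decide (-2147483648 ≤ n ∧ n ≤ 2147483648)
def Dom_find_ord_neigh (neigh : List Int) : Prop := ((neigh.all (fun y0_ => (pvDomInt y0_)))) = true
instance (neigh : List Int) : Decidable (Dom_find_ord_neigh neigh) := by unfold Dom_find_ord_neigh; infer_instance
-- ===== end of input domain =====

-- B replaces the nested 5x5 grid scan with a closed-form arithmetic formula for the column (the grid is exactly the values 1..25), dropping the grid data entirely (faster by a constant factor).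

-- ===== PORT A =====
def composant : List (List Int) :=
  [[1, 3, 5, 7, 9],
   [2, 4, 6, 8, 10],
   [11, 13, 15, 17, 19],
   [12, 14, 16, 18, 20],
   [21, 22, 23, 24, 25]]

-- composant[i][j] for i, j always produced by range(5), so the defaults are never used
def compAt (i j : Int) : Int :=
  PySem.List.pyGetD (PySem.List.pyGetD composant i []) j 0

def find_ord_neigh (neigh : List Int) : List Int :=
  neigh.foldl (fun acc elt =>
    (PySem.List.pyRange 0 5 1).foldl (fun acc i =>
      (PySem.List.pyRange 0 5 1).foldl (fun acc j =>
        if elt == compAt i j then acc ++ [j] else acc) acc) acc) []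

-- ===== PORT B =====
def find_ord_neigh_alt (neigh : List Int) : List Int :=
  neigh.foldl (fun acc elt =>
    if 1 ≤ elt ∧ elt ≤ 10 then acc ++ [PySem.Int.floordiv (elt - 1) 2]
    else if 11 ≤ elt ∧ elt ≤ 20 then acc ++ [PySem.Int.floordiv (elt - 11) 2]
    else if 21 ≤ elt ∧ elt ≤ 25 then acc ++ [elt - 21]
    else acc) []

-- ===== PRECONDITION & SPEC =====
def Spec_find_ord_neigh (neigh : List Int) (out : List Int) : Prop := out = find_ord_neigh_alt neigh
instance (neigh : List Int) (out : List Int) : Decidable (Spec_find_ord_neigh neigh out) := by unfold Spec_find_ord_neigh; infer_instance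

-- ===== CLAIM (what is proved, stated in full; the proofs are below) =====
def Claim_equal_find_ord_neigh : Prop := ∀ (neigh : List Int), Dom_find_ord_neigh neigh → Spec_find_ord_neigh neigh (find_ord_neigh neigh)

-- ===== LEMMAS AND PROOFS =====

-- the grid values, in A's scan order
def gridVals : List Int :=
  [1, 3, 5, 7, 9, 2, 4, 6, 8, 10, 11, 13, 15, 17, 19, 12, 14, 16, 18, 20, 21, 22, 23, 24, 25]

-- one element's contribution in A, as a flat list (nested scan flattened)
def stepA (elt : Int) : List Int :=
  (PySem.List.pyRange 0 5 1).flatMap (fun i =>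
    ((PySem.List.pyRange 0 5 1).filter (fun j => elt == compAt i j)).map id)

-- one element's contribution in B
def stepB (elt : Int) : List Int :=
  if 1 ≤ elt ∧ elt ≤ 10 then [PySem.Int.floordiv (elt - 1) 2]
  else if 11 ≤ elt ∧ elt ≤ 20 then [PySem.Int.floordiv (elt - 11) 2]
  else if 21 ≤ elt ∧ elt ≤ 25 then [elt - 21]
  else []

lemma nested_eq_stepA (elt : Int) (acc : List Int) :
    (PySem.List.pyRange 0 5 1).foldl (fun acc i =>
      (PySem.List.pyRange 0 5 1).foldl (fun acc j =>
        if elt == compAt i j then acc ++ [j] else acc) acc) acc = acc ++ stepA elt := by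
  have hinner : ∀ (i : Int) (acc : List Int),
      (PySem.List.pyRange 0 5 1).foldl (fun acc j =>
        if elt == compAt i j then acc ++ [j] else acc) acc
      = acc ++ ((PySem.List.pyRange 0 5 1).filter (fun j => elt == compAt i j)).map id := by
    intro i acc
    exact PySem.List.foldl_append_if (fun j => elt == compAt i j) id (PySem.List.pyRange 0 5 1) acc
  calc (PySem.List.pyRange 0 5 1).foldl (fun acc i =>
        (PySem.List.pyRange 0 5 1).foldl (fun acc j =>
          if elt == compAt i j then acc ++ [j] else acc) acc) acc
      = (PySem.List.pyRange 0 5 1).foldl (fun acc i =>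
          acc ++ ((PySem.List.pyRange 0 5 1).filter (fun j => elt == compAt i j)).map id) acc := by
        exact PySem.List.foldl_congr_mem _ _ _ _ (fun acc' i _ => hinner i acc')
    _ = acc ++ stepA elt := PySem.List.foldl_append_eq_flatMap _ _ _

set_option maxRecDepth 8192 in
lemma stepA_eq_stepB (elt : Int) : stepA elt = stepB elt := by
  by_cases hm : elt ∈ gridVals
  · fin_cases hm <;> decide
  · have hne : ∀ c ∈ gridVals, elt ≠ c := fun c hc he => hm (he ▸ hc)
    have hrange : PySem.List.pyRange 0 5 1 = [0, 1, 2, 3, 4] := by decide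
    have hfilter : ∀ i ∈ ([0,1,2,3,4] : List Int),
        (([0,1,2,3,4] : List Int).filter (fun j => elt == compAt i j)) = [] := by
      intro i hi
      refine List.filter_eq_nil_iff.mpr (fun j hj => ?_)
      have hmem : compAt i j ∈ gridVals := by fin_cases hi <;> fin_cases hj <;> decide
      simp [hne _ hmem]
    have hL : stepA elt = [] := by
      simp only [stepA, hrange]
      rw [List.flatMap_eq_nil_iff]
      intro i hi
      rw [hfilter i hi]
      rfl
    have hrangeval : ¬ (1 ≤ elt ∧ elt ≤ 25) := by
      intro ⟨h1, h2⟩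
      apply hm
      interval_cases elt <;> decide
    have hR : stepB elt = [] := by
      unfold stepB
      split_ifs with a b c <;> first | rfl | (exfalso; exact hrangeval (by omega))
    rw [hL, hR]

lemma main_eq (neigh : List Int) : find_ord_neigh neigh = find_ord_neigh_alt neigh := by
  unfold find_ord_neigh find_ord_neigh_alt
  induction neigh using List.reverseRecOn with
  | nil => rfl
  | append_singleton xs x ih =>
    simp only [List.foldl_append, List.foldl_cons, List.foldl_nil]
    rw [ih, nested_eq_stepA, stepA_eq_stepB]
    unfold stepB
    split_ifs <;> simp

-- ===== VERDICT (by name: the statement is the Claim_ definition above) =====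
theorem find_ord_neigh_spec : Claim_equal_find_ord_neigh := by
  unfold Claim_equal_find_ord_neigh Spec_find_ord_neigh
  intro neigh _
  exact main_eq neigh
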